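-- pv_equiv track=rewrite | github.com/gnosischain/execution-specs | packages/testing/src/execution_testing/vm/opcodes.py | _get_int_size
-- ===== SOURCE A (Python) =====
-- def _get_int_size(n: int) -> int:
--     """Return size of an integer in bytes."""
--     if n < 0:
--         # Negative numbers in the EVM are represented as two's complement
--         # of 32 bytes
--         return 32
--     byte_count = 0
--     while n:
--         byte_count += 1
--         n >>= 8
--     return byte_count
-- ===== SOURCE B (Python) =====
-- def _get_int_size(n: int) -> int:
--     """Return size of an integer in bytes."""
--     if n < 0:
--         # Negative numbers in the EVM are represented as two's complement
--         # of 32 bytes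
--         return 32
--     return (n.bit_length() + 7) // 8
-- ===== Notes on version B (the rewrite author's own statement) =====
-- stated objective: idiomatic
-- what changed: Replaces the shift-by-8-and-count while loop with the closed form (n.bit_length() + 7) // 8.
import Mathlib
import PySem

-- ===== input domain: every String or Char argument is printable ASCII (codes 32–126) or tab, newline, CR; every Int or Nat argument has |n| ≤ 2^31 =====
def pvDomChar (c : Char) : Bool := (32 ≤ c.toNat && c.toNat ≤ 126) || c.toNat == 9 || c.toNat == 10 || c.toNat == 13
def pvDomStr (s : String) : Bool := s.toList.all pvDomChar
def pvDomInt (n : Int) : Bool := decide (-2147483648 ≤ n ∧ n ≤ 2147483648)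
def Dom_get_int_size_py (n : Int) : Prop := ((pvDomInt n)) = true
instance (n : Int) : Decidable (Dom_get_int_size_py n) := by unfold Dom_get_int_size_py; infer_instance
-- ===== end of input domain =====

-- B replaces A's shift-and-count loop with the closed form (bit_length + 7) // 8 (idiomatic; return value only).

-- ===== PORT A =====
-- the `while n: byte_count += 1; n >>= 8` loop (n ≥ 0 here, so carried as a Nat)
def pvLoopA (n : Nat) : Nat :=
  if _h : n = 0 then 0 else pvLoopA (n >>> 8) + 1
decreasing_by
  simp only [Nat.shiftRight_eq_div_pow]
  exact Nat.div_lt_self (Nat.pos_of_ne_zero _h) (by norm_num)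

def get_int_size_py (n : Int) : Int :=
  if n < 0 then 32 else (pvLoopA n.toNat : Int)

-- ===== PORT B =====
def get_int_size_py_alt (n : Int) : Int :=
  if n < 0 then 32 else PySem.Int.floordiv (PySem.Int.bitLength n + 7) 8

-- ===== PRECONDITION & SPEC =====
def Spec_get_int_size_py (n : Int) (out : Int) : Prop := out = get_int_size_py_alt n
instance (n : Int) (out : Int) : Decidable (Spec_get_int_size_py n out) := by unfold Spec_get_int_size_py; infer_instance

-- ===== CLAIM (what is proved, stated in full; the proofs are below) =====
def Claim_equal_get_int_size_py : Prop := ∀ (n : Int), Dom_get_int_size_py n → Spec_get_int_size_py n (get_int_size_py n)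

-- ===== LEMMAS AND PROOFS =====

-- Python's bit_length on a nonnegative integer is Nat.size
theorem pv_bitLength_eq_size (m : Nat) : PySem.Int.bitLength (m : Int) = Nat.size m := by
  rcases Nat.eq_zero_or_pos m with h0 | hpos
  · subst h0; simp [PySem.Int.bitLength_zero]
  · apply Nat.le_antisymm
    · have h1 := PySem.Int.two_pow_bitLength_le (m : Int) (by exact_mod_cast Nat.pos_iff_ne_zero.mp hpos)
      rw [Int.natAbs_natCast] at h1
      have hlt : m < 2 ^ Nat.size m := Nat.lt_size_self m
      have hbl : 0 < PySem.Int.bitLength (m : Int) := by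
        by_contra hc
        have hz : PySem.Int.bitLength (m : Int) = 0 := by omega
        have h2 := PySem.Int.lt_two_pow_bitLength (m : Int)
        rw [Int.natAbs_natCast, hz] at h2
        omega
      have hpow : 2 ^ (PySem.Int.bitLength (m : Int) - 1) < 2 ^ Nat.size m :=
        Nat.lt_of_le_of_lt h1 hlt
      have := (Nat.pow_lt_pow_iff_right (by norm_num : 1 < 2)).mp hpow
      omega
    · have := PySem.Int.lt_two_pow_bitLength (m : Int)
      rw [Int.natAbs_natCast] at this
      exact Nat.size_le.mpr this

theorem pv_size_div256 {n : Nat} (h : 256 ≤ n) : Nat.size (n >>> 8) = Nat.size n - 8 := by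
  have hs9 : 9 ≤ Nat.size n := by
    have : 8 < Nat.size n := Nat.lt_size.mpr (by norm_num; omega)
    omega
  have hlt : n < 2 ^ Nat.size n := Nat.lt_size_self n
  have hle : 2 ^ (Nat.size n - 1) ≤ n := Nat.lt_size.mp (by omega)
  rw [Nat.shiftRight_eq_div_pow]
  apply Nat.le_antisymm
  · apply Nat.size_le.mpr
    rw [Nat.div_lt_iff_lt_mul (by norm_num)]
    calc n < 2 ^ Nat.size n := hlt
      _ = 2 ^ (Nat.size n - 8) * 2 ^ 8 := by rw [← pow_add]; congr 1; omega
  · have : Nat.size n - 9 < Nat.size (n / 2 ^ 8) := by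
      apply Nat.lt_size.mpr
      rw [Nat.le_div_iff_mul_le (by norm_num)]
      calc 2 ^ (Nat.size n - 9) * 2 ^ 8 = 2 ^ (Nat.size n - 1) := by
            rw [← pow_add]; congr 1; omega
        _ ≤ n := hle
    omega

theorem pv_loopA_eq (n : Nat) : pvLoopA n = (Nat.size n + 7) / 8 := by
  induction n using Nat.strong_induction_on with
  | _ n ih =>
    rw [pvLoopA]
    split_ifs with h0
    · subst h0; simp
    · have hlt : n >>> 8 < n := by
        simp only [Nat.shiftRight_eq_div_pow]
        exact Nat.div_lt_self (Nat.pos_of_ne_zero h0) (by norm_num)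
      rw [ih _ hlt]
      by_cases hsmall : n < 256
      · have : n >>> 8 = 0 := by
          simp only [Nat.shiftRight_eq_div_pow]
          exact Nat.div_eq_of_lt (by norm_num; omega)
        rw [this]
        have h1 : 1 ≤ Nat.size n := Nat.size_pos.mpr (Nat.pos_of_ne_zero h0)
        have h2 : Nat.size n ≤ 8 := Nat.size_le.mpr (by norm_num; omega)
        simp only [Nat.size_zero]
        omega
      · rw [pv_size_div256 (by omega)]
        have : 8 < Nat.size n := Nat.lt_size.mpr (by norm_num; omega)
        omega

-- ===== VERDICT (by name: the statement is the Claim_ definition above) =====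
theorem get_int_size_py_spec : Claim_equal_get_int_size_py := by
  intro n _
  unfold Spec_get_int_size_py get_int_size_py get_int_size_py_alt
  split_ifs with hneg
  · rfl
  · have hcast : n = (n.toNat : Int) := (Int.toNat_of_nonneg (le_of_not_gt hneg)).symm
    rw [hcast, pv_bitLength_eq_size, pv_loopA_eq]
    have : ((Nat.size n.toNat : Int) + 7) = ((Nat.size n.toNat + 7 : Nat) : Int) := by push_cast; ring
    rw [this]
    exact (by exact_mod_cast PySem.Int.floordiv_natCast (Nat.size n.toNat + 7) 8 : PySem.Int.floordiv ((Nat.size n.toNat + 7 : Nat) : Int) 8 = ((Nat.size n.toNat + 7) / 8 : Nat)).symm
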